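-- pv_equiv track=rewrite | github.com/tca19/AoC-18 | day10/day10.py | find_message
-- ===== SOURCE A (Python) =====
-- def bounding_box(points):
--     xmin = xmax = points[0][0]
--     ymin = ymax = points[0][1]
--     for p in points[1:]:
--         xmin = min(xmin, p[0])
--         xmax = max(xmax, p[0])
--         ymin = min(ymin, p[1])
--         ymax = max(ymax, p[1])
--     return xmin, xmax, ymin, ymax
--
-- def find_message(points, vx, vy, iterations):
--     # move the points like a certain number of iteration happened
--     for i in range(len(points)):
--         points[i][0] += vx[i] * iterations
--         points[i][1] += vy[i] * iterations
--
--     # build ascii message, with '#' for points. The size of the message is the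
--     # same as the bounding box.
--     xmin, xmax, ymin, ymax = bounding_box(points)
--     grid = [ [' ' for _ in range(xmin, xmax+1)] for _ in range(ymin, ymax+1) ]
--     for x, y in points:
--         grid[y-ymin][x-xmin] = '#'
--
--     message = ["".join(row) for row in grid]
--     return '\n'.join(message)
-- ===== SOURCE B (Python) =====
-- def find_message(points, vx, vy, iterations):
--     # move the points in place (same mutation as the original)
--     for i in range(len(points)):
--         points[i][0] += vx[i] * iterations
--         points[i][1] += vy[i] * iterations
--
--     xmin = xmax = points[0][0]
--     ymin = ymax = points[0][1]
--     for p in points[1:]: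
--         xmin = min(xmin, p[0])
--         xmax = max(xmax, p[0])
--         ymin = min(ymin, p[1])
--         ymax = max(ymax, p[1])
--
--     # gather pass: membership in a point set instead of scattering into a grid
--     occupied = {(x, y) for x, y in points}
--     return '\n'.join(
--         ''.join('#' if (x, y) in occupied else ' ' for x in range(xmin, xmax + 1))
--         for y in range(ymin, ymax + 1))
-- ===== Notes on version B (the rewrite author's own statement) =====
-- stated objective: idiomatic
-- what changed: The init-a-2D-grid-then-scatter rendering is replaced by a gather pass: build a set of (x, y) tuples from the moved points and emit '#'/' ' by membership while iterating the bounding-box cells directly.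
import Mathlib
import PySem

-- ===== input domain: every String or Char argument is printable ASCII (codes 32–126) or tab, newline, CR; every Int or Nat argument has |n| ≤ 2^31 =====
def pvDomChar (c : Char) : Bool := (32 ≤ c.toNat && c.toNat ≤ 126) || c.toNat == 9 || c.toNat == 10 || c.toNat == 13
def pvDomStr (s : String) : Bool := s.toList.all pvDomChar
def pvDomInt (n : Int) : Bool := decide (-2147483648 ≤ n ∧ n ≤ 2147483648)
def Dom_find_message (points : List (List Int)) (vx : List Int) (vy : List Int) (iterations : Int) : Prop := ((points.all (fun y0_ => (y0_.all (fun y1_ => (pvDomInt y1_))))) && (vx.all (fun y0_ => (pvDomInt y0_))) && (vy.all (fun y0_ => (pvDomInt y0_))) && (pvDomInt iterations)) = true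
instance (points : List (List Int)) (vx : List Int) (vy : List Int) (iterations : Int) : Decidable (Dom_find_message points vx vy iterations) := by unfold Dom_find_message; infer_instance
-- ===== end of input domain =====

-- B replaces A's init-grid-then-scatter rendering by a gather pass over the bounding-box
-- cells testing membership in a set of moved (x, y) tuples (idiomatic; same cost).
-- Both A and B mutate `points` in place identically; the equivalence proved here is about
-- the RETURN value only.

-- ===== PORT A =====
-- shared move loop: `for i in range(len(points)): points[i][0] += vx[i]*iterations; ...`
-- (identical in Source A and Source B); structural recursion over the list carrying the index i
def pvMove (vx : List Int) (vy : List Int) (it : Int) : Nat → List (List Int) → List (List Int)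
  | _, [] => []
  | i, p :: rest =>
    (match p with
     | a :: b :: r => (a + vx.getD i 0 * it) :: (b + vy.getD i 0 * it) :: r
     | q => q) :: pvMove vx vy it (i + 1) rest

-- shared bounding_box helper (identical in Source A and Source B)
def pvBBoxStep (s : Int × Int × Int × Int) (p : List Int) : Int × Int × Int × Int :=
  (min s.1 (p.getD 0 0), max s.2.1 (p.getD 0 0), min s.2.2.1 (p.getD 1 0), max s.2.2.2 (p.getD 1 0))

def pvBBox (points : List (List Int)) : Int × Int × Int × Int :=
  let p0 := points.headD []
  (points.drop 1).foldl pvBBoxStep (p0.getD 0 0, p0.getD 0 0, p0.getD 1 0, p0.getD 1 0)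

-- A's scatter step: `grid[y-ymin][x-xmin] = '#'` for each 2-element point
def pvScatterStep (xmin ymin : Int) (g : List (List Char)) (p : List Int) : List (List Char) :=
  match p with
  | [x, y] => g.set (y - ymin).toNat ((g.getD (y - ymin).toNat []).set (x - xmin).toNat '#')
  | _ => g

def find_message (points : List (List Int)) (vx : List Int) (vy : List Int) (iterations : Int) : String :=
  let moved := pvMove vx vy iterations 0 points
  let bb := pvBBox moved
  let row := (PySem.List.pyRange bb.1 (bb.2.1 + 1) 1).map (fun _ => ' ')
  let grid0 := (PySem.List.pyRange bb.2.2.1 (bb.2.2.2 + 1) 1).map (fun _ => row)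
  let grid := moved.foldl (pvScatterStep bb.1 bb.2.2.1) grid0
  String.intercalate "\n" (grid.map (fun r => String.mk r))

-- ===== PORT B =====
def find_message_alt (points : List (List Int)) (vx : List Int) (vy : List Int) (iterations : Int) : String :=
  let moved := pvMove vx vy iterations 0 points
  let bb := pvBBox moved
  let occupied := PySem.Set.ofList (moved.map (fun p => (p.getD 0 0, p.getD 1 0)))
  String.intercalate "\n" ((PySem.List.pyRange bb.2.2.1 (bb.2.2.2 + 1) 1).map (fun y =>
    String.mk ((PySem.List.pyRange bb.1 (bb.2.1 + 1) 1).map (fun x =>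
      if PySem.Set.contains occupied (x, y) then '#' else ' '))))

-- ===== PRECONDITION & SPEC =====
-- Pre_ excludes exactly the inputs where A raises: empty points (IndexError in bounding_box),
-- a point whose length is not 2 (IndexError / unpacking ValueError), or velocity lists
-- shorter than points (IndexError in the move loop).
def Pre_find_message (points : List (List Int)) (vx : List Int) (vy : List Int) (iterations : Int) : Prop :=
  points ≠ [] ∧ (∀ p ∈ points, p.length = 2) ∧ points.length ≤ vx.length ∧ points.length ≤ vy.length
instance (points : List (List Int)) (vx : List Int) (vy : List Int) (iterations : Int) : Decidable (Pre_find_message points vx vy iterations) := by unfold Pre_find_message; infer_instance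

def pvWitness_find_message : List (List Int) × List Int × List Int × Int := ([[1, 1], [4, 2]], [1, 0], [0, 1], 2)

def Spec_find_message (points : List (List Int)) (vx : List Int) (vy : List Int) (iterations : Int) (out : String) : Prop := out = find_message_alt points vx vy iterations
instance (points : List (List Int)) (vx : List Int) (vy : List Int) (iterations : Int) (out : String) : Decidable (Spec_find_message points vx vy iterations out) := by unfold Spec_find_message; infer_instance

-- ===== CLAIM (what is proved, stated in full; the proofs are below) =====
def Claim_equal_find_message : Prop := ∀ (points : List (List Int)) (vx : List Int) (vy : List Int) (iterations : Int), Dom_find_message points vx vy iterations → Pre_find_message points vx vy iterations → Spec_find_message points vx vy iterations (find_message points vx vy iterations)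

-- ===== LEMMAS AND PROOFS =====

theorem pvMove_shape (vx vy : List Int) (it : Int) :
    ∀ (i : Nat) (pts : List (List Int)), (∀ p ∈ pts, p.length = 2) →
      ∀ q ∈ pvMove vx vy it i pts, ∃ x y, q = [x, y] := by
  intro i pts
  induction pts generalizing i with
  | nil => intro _ q hq; simp [pvMove] at hq
  | cons p rest ih =>
    intro h q hq
    simp only [pvMove, List.mem_cons] at hq
    rcases hq with rfl | hq
    · have hp := h p (by simp)
      match p, hp with
      | [a, b], _ => exact ⟨_, _, rfl⟩
    · exact ih (i + 1) (fun r hr => h r (by simp [hr])) q hq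

theorem pvMove_ne_nil (vx vy : List Int) (it : Int) (i : Nat) (pts : List (List Int))
    (h : pts ≠ []) : pvMove vx vy it i pts ≠ [] := by
  cases pts with
  | nil => exact absurd rfl h
  | cons p rest => simp [pvMove]

theorem pvBBoxStep_fold_bounds (l : List (List Int)) :
    ∀ s : Int × Int × Int × Int,
      ((l.foldl pvBBoxStep s).1 ≤ s.1 ∧ s.2.1 ≤ (l.foldl pvBBoxStep s).2.1 ∧
       (l.foldl pvBBoxStep s).2.2.1 ≤ s.2.2.1 ∧ s.2.2.2 ≤ (l.foldl pvBBoxStep s).2.2.2) ∧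
      (∀ p ∈ l, (l.foldl pvBBoxStep s).1 ≤ p.getD 0 0 ∧ p.getD 0 0 ≤ (l.foldl pvBBoxStep s).2.1 ∧
        (l.foldl pvBBoxStep s).2.2.1 ≤ p.getD 1 0 ∧ p.getD 1 0 ≤ (l.foldl pvBBoxStep s).2.2.2) := by
  induction l with
  | nil => intro s; simp
  | cons p rest ih =>
    intro s
    have h := ih (pvBBoxStep s p)
    simp only [List.foldl_cons]
    refine ⟨?_, ?_⟩
    · have h1 := h.1
      simp only [pvBBoxStep] at h1 ⊢
      omega
    · intro q hq
      rcases List.mem_cons.mp hq with rfl | hq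
      · have h1 := h.1
        simp only [pvBBoxStep] at h1 ⊢
        omega
      · have h2 := h.2 q hq
        simp only [pvBBoxStep] at h2 ⊢
        omega

theorem pvBBox_bounds (pts : List (List Int)) (h : pts ≠ []) :
    ∀ p ∈ pts, (pvBBox pts).1 ≤ p.getD 0 0 ∧ p.getD 0 0 ≤ (pvBBox pts).2.1 ∧
      (pvBBox pts).2.2.1 ≤ p.getD 1 0 ∧ p.getD 1 0 ≤ (pvBBox pts).2.2.2 := by
  cases pts with
  | nil => exact absurd rfl h
  | cons p0 rest =>
    intro p hp
    have h := pvBBoxStep_fold_bounds rest (p0.getD 0 0, p0.getD 0 0, p0.getD 1 0, p0.getD 1 0)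
    rcases List.mem_cons.mp hp with rfl | hp
    · have := h.1
      simp only [pvBBox, List.headD_cons, List.drop_one, List.tail_cons]
      omega
    · have := h.2 p hp
      simp only [pvBBox, List.headD_cons, List.drop_one, List.tail_cons]
      omega

-- the heart: the scattered grid, read cell by cell, is an existence test over the points
theorem pvScatter_main (xmin ymin : Int) (H W : Nat) :
    ∀ (pts : List (List Int)) (g : List (List Char)),
      g.length = H → (∀ r ∈ g, r.length = W) →
      (∀ p ∈ pts, ∃ x y, p = [x, y] ∧ xmin ≤ x ∧ x - xmin < (W : Int) ∧ ymin ≤ y ∧ y - ymin < (H : Int)) →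
      (pts.foldl (pvScatterStep xmin ymin) g).length = H ∧
      (∀ r ∈ pts.foldl (pvScatterStep xmin ymin) g, r.length = W) ∧
      (∀ (rr cc : Nat), rr < H → cc < W →
        ((pts.foldl (pvScatterStep xmin ymin) g).getD rr []).getD cc ' ' =
          if pts.any (fun p => p.getD 0 0 == xmin + (cc : Int) && p.getD 1 0 == ymin + (rr : Int)) then '#'
          else (g.getD rr []).getD cc ' ') := by
  intro pts
  induction pts with
  | nil =>
    intro g hlen hrows _
    exact ⟨hlen, hrows, fun rr cc _ _ => by simp⟩
  | cons p rest ih =>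
    intro g hlen hrows hshape
    obtain ⟨x, y, rfl, hx0, hx1, hy0, hy1⟩ := hshape p (by simp)
    have hry : (y - ymin).toNat < g.length := by omega
    have hrowmem : g.getD (y - ymin).toNat [] ∈ g := by
      rw [List.getD_eq_getElem _ _ hry]; exact List.getElem_mem hry
    have hroww : (g.getD (y - ymin).toNat []).length = W := hrows _ hrowmem
    have hstep : pvScatterStep xmin ymin g [x, y] =
        g.set (y - ymin).toNat ((g.getD (y - ymin).toNat []).set (x - xmin).toNat '#') := rfl
    have hlen' : (pvScatterStep xmin ymin g [x, y]).length = H := by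
      rw [hstep, List.length_set, hlen]
    have hrows' : ∀ r ∈ pvScatterStep xmin ymin g [x, y], r.length = W := by
      rw [hstep]
      intro r hr
      rcases List.mem_or_eq_of_mem_set hr with hr | rfl
      · exact hrows r hr
      · rw [List.length_set]; exact hroww
    have hsh' : ∀ p ∈ rest, ∃ x y, p = [x, y] ∧ xmin ≤ x ∧ x - xmin < (W : Int) ∧ ymin ≤ y ∧ y - ymin < (H : Int) :=
      fun q hq => hshape q (by simp [hq])
    have h := ih (pvScatterStep xmin ymin g [x, y]) hlen' hrows' hsh'
    refine ⟨by rw [List.foldl_cons]; exact h.1, by rw [List.foldl_cons]; exact h.2.1, ?_⟩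
    intro rr cc hrr hcc
    rw [List.foldl_cons]
    rw [h.2.2 rr cc hrr hcc]
    -- cell of the stepped grid
    have hcell : ((pvScatterStep xmin ymin g [x, y]).getD rr []).getD cc ' ' =
        if (x == xmin + (cc : Int) && y == ymin + (rr : Int)) then '#'
        else (g.getD rr []).getD cc ' ' := by
      rw [hstep]
      set v := (g.getD (y - ymin).toNat []).set (x - xmin).toNat '#' with hv
      have hvlen : v.length = W := by rw [hv, List.length_set]; exact hroww
      have hget_self : (g.set (y - ymin).toNat v).getD (y - ymin).toNat [] = v := by
        rw [List.getD_eq_getElem _ _ (by rw [List.length_set]; exact hry)]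
        exact List.getElem_set_self _
      by_cases hr : rr = (y - ymin).toNat
      · subst hr
        rw [hget_self]
        by_cases hc : cc = (x - xmin).toNat
        · subst hc
          have hv1 : v.getD (x - xmin).toNat ' ' = '#' := by
            rw [hv, List.getD_eq_getElem _ _ (by rw [List.length_set]; omega)]
            exact List.getElem_set_self _
          rw [hv1]
          have hcond : (x == xmin + (((x - xmin).toNat : Nat) : Int) &&
              y == ymin + (((y - ymin).toNat : Nat) : Int)) = true := by
            simp only [Bool.and_eq_true, beq_iff_eq]
            omega
          rw [hcond]
          rfl
        · have hv2 : v.getD cc ' ' = (g.getD (y - ymin).toNat []).getD cc ' ' := by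
            rw [hv, List.getD_eq_getElem _ _ (by rw [List.length_set]; omega),
                List.getElem_set_ne (by omega), ← List.getD_eq_getElem _ ' ' (by omega)]
          rw [hv2]
          have hcond : (x == xmin + (cc : Int)) = false := by
            simp only [beq_eq_false_iff_ne, ne_eq]
            intro hxe; apply hc; omega
          rw [hcond]
          simp
      · have hget_ne : (g.set (y - ymin).toNat v).getD rr [] = g.getD rr [] := by
          rw [List.getD_eq_getElem _ _ (by rw [List.length_set]; omega),
              List.getElem_set_ne (by omega), ← List.getD_eq_getElem _ [] (by omega)]
        rw [hget_ne]
        have hcond : (y == ymin + (rr : Int)) = false := by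
          simp only [beq_eq_false_iff_ne, ne_eq]
          intro hye; apply hr; omega
        simp [hcond]
    rw [hcell]
    simp only [List.any_cons, List.getD_cons_zero, List.getD_cons_succ]
    by_cases hp : (x == xmin + (cc : Int) && y == ymin + (rr : Int)) = true
    · simp [hp]
    · simp only [Bool.not_eq_true] at hp
      simp [hp]

-- ===== VERDICT (by name: the statement is the Claim_ definition above) =====
theorem find_message_spec : Claim_equal_find_message := by
  intro points vx vy iterations _ hpre
  obtain ⟨hne, hlen2, _, _⟩ := hpre
  unfold Spec_find_message find_message find_message_alt
  simp only []
  set moved := pvMove vx vy iterations 0 points with hmoved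
  have hmne : moved ≠ [] := pvMove_ne_nil vx vy iterations 0 points hne
  have hmsh : ∀ q ∈ moved, ∃ x y, q = [x, y] := pvMove_shape vx vy iterations 0 points hlen2
  set bb := pvBBox moved with hbb
  have hbounds := pvBBox_bounds moved hmne
  rw [← hbb] at hbounds
  set W : Nat := (bb.2.1 + 1 - bb.1).toNat with hW
  set H : Nat := (bb.2.2.2 + 1 - bb.2.2.1).toNat with hH
  -- shape facts about moved points, in the form pvScatter_main wants
  have hshape : ∀ p ∈ moved, ∃ x y, p = [x, y] ∧ bb.1 ≤ x ∧ x - bb.1 < (W : Int) ∧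
      bb.2.2.1 ≤ y ∧ y - bb.2.2.1 < (H : Int) := by
    intro p hp
    obtain ⟨x, y, rfl⟩ := hmsh p hp
    have hb := hbounds _ hp
    simp only [List.getD_cons_zero, List.getD_cons_succ] at hb
    exact ⟨x, y, rfl, by omega, by omega, by omega, by omega⟩
  -- the initial grid
  have hrow_len : ((PySem.List.pyRange bb.1 (bb.2.1 + 1) 1).map (fun _ => ' ')).length = W := by
    simp [PySem.List.length_pyRange_one, hW]
  have hgrid0_len : ((PySem.List.pyRange bb.2.2.1 (bb.2.2.2 + 1) 1).map
      (fun _ => (PySem.List.pyRange bb.1 (bb.2.1 + 1) 1).map (fun _ => ' '))).length = H := by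
    simp [PySem.List.length_pyRange_one, hH]
  have hgrid0_rows : ∀ r ∈ (PySem.List.pyRange bb.2.2.1 (bb.2.2.2 + 1) 1).map
      (fun _ => (PySem.List.pyRange bb.1 (bb.2.1 + 1) 1).map (fun _ => ' ')), r.length = W := by
    intro r hr
    rw [List.mem_map] at hr
    obtain ⟨_, _, rfl⟩ := hr
    exact hrow_len
  have hmain := pvScatter_main bb.1 bb.2.2.1 H W moved _ hgrid0_len hgrid0_rows hshape
  -- it suffices that the two row-string lists agree
  congr 1
  apply List.ext_getElem
  · simp only [List.length_map, hmain.1, PySem.List.length_pyRange_one, hH]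
  intro rr h1 h2
  have hrrH : rr < H := by
    simpa only [List.length_map, PySem.List.length_pyRange_one, ← hH] using h2
  simp only [List.getElem_map, PySem.List.getElem_pyRange_one]
  congr 1
  apply List.ext_getElem
  · rw [hmain.2.1 _ (List.getElem_mem (by rw [hmain.1]; exact hrrH))]
    simp [PySem.List.length_pyRange_one, hW]
  intro cc h3 h4
  have hccW : cc < W := by
    simpa only [List.length_map, PySem.List.length_pyRange_one, ← hW] using h4
  simp only [List.getElem_map, PySem.List.getElem_pyRange_one]
  -- left side via the scatter characterisation
  have hgl : (moved.foldl (pvScatterStep bb.1 bb.2.2.1) _).length = H := hmain.1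
  rw [← List.getD_eq_getElem _ ' ' h3, ← List.getD_eq_getElem _ [] (by rw [hgl]; exact hrrH),
      hmain.2.2 rr cc hrrH hccW]
  -- initial grid cell is ' '
  have hinit : (((PySem.List.pyRange bb.2.2.1 (bb.2.2.2 + 1) 1).map
      (fun _ => (PySem.List.pyRange bb.1 (bb.2.1 + 1) 1).map (fun _ => ' '))).getD rr []).getD cc ' ' = ' ' := by
    rw [List.getD_eq_getElem _ [] (by rw [hgrid0_len]; exact hrrH)]
    simp only [List.getElem_map]
    rw [List.getD_eq_getElem _ ' ' (by rw [hrow_len]; exact hccW)]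
    simp
  rw [hinit]
  -- the two membership tests agree
  have hmem : (moved.any (fun p => p.getD 0 0 == bb.1 + (cc : Int) && p.getD 1 0 == bb.2.2.1 + (rr : Int))) =
      PySem.Set.contains (PySem.Set.ofList (moved.map (fun p => (p.getD 0 0, p.getD 1 0))))
        (bb.1 + (cc : Int), bb.2.2.1 + (rr : Int)) := by
    rw [Bool.eq_iff_iff, List.any_eq_true, PySem.Set.contains_iff, PySem.Set.mem_ofList, List.mem_map]
    constructor
    · rintro ⟨p, hp, hcond⟩
      simp only [Bool.and_eq_true, beq_iff_eq] at hcond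
      exact ⟨p, hp, by rw [hcond.1, hcond.2]⟩
    · rintro ⟨p, hp, heq⟩
      refine ⟨p, hp, ?_⟩
      have h1 : p.getD 0 0 = bb.1 + (cc : Int) := congrArg Prod.fst heq
      have h2 : p.getD 1 0 = bb.2.2.1 + (rr : Int) := congrArg Prod.snd heq
      simp only [Bool.and_eq_true, beq_iff_eq]
      exact ⟨h1, h2⟩
  rw [hmem]
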